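-- pv_equiv track=rewrite | github.com/kungfuai/CVlization | examples/generative/video_generation/wan2gp/vendor/wan2gp/shared/utils/loras_mutipliers.py | _find_bar
-- ===== SOURCE A (Python) =====
-- def _find_bar(s: str) -> int:
--     com = False
--     for i, ch in enumerate(s):
--         if ch in ('\n', '\r'):
--             com = False
--         elif ch == '#':
--             com = True
--         elif ch == '|' and not com:
--             return i
--     return -1
-- ===== SOURCE B (Python) =====
-- def _find_bar(s: str) -> int:
--     # Right-to-left single pass: for each suffix keep a pair of answers,
--     # a = result if the suffix is scanned starting outside a comment,
--     # b = result if it is scanned starting inside a comment.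
--     a = b = -1
--     for ch in reversed(s):
--         sa = -1 if a == -1 else a + 1
--         sb = -1 if b == -1 else b + 1
--         if ch in ('\n', '\r'):
--             a = b = sa
--         elif ch == '#':
--             a = b = sb
--         elif ch == '|':
--             a, b = 0, sb
--         else:
--             a, b = sa, sb
--     return a
-- ===== Notes on version B (the rewrite author's own statement) =====
-- stated objective: alternative
-- what changed: Replaced A's forward scan with a mutable comment flag and early return by a backwards single pass (a right fold) that carries for each suffix a pair of answers, one assuming the scan starts outside a comment and one assuming it starts inside; no flag, no early return.
import Mathlib
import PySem

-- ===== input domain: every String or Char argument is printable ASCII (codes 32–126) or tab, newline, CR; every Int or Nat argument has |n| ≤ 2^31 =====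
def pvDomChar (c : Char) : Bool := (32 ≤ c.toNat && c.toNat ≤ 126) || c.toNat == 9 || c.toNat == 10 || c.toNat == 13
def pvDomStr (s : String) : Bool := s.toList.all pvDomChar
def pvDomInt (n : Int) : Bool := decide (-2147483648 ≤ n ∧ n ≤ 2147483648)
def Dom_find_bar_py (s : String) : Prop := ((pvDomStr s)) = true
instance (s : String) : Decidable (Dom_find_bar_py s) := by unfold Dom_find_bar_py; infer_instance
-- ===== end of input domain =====

-- B replaces A's forward scan-with-comment-flag by a backwards pass folding a pair of
-- suffix answers (objective: alternative decomposition, same cost).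

-- ===== PORT A =====
-- forward scan: index i, comment flag com, early return on '|' outside a comment
def findBarAux : List Char → Int → Bool → Int
  | [], _, _ => -1
  | c :: cs, i, com =>
    if c = '\n' ∨ c = '\r' then findBarAux cs (i + 1) false
    else if c = '#' then findBarAux cs (i + 1) true
    else if c = '|' ∧ com = false then i
    else findBarAux cs (i + 1) com

def find_bar_py (s : String) : Int := findBarAux s.toList 0 false

-- ===== PORT B =====
-- sa/sb: the answer for the one-longer suffix ("-1 if x == -1 else x + 1")
def fbShift (x : Int) : Int := if x = -1 then -1 else x + 1

def fbStep (c : Char) (p : Int × Int) : Int × Int :=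
  let sa := fbShift p.1
  let sb := fbShift p.2
  if c = '\n' ∨ c = '\r' then (sa, sa)
  else if c = '#' then (sb, sb)
  else if c = '|' then (0, sb)
  else (sa, sb)

def find_bar_py_alt (s : String) : Int := (s.toList.foldr fbStep (-1, -1)).1

-- ===== PRECONDITION & SPEC =====
def Spec_find_bar_py (s : String) (out : Int) : Prop := out = find_bar_py_alt s
instance (s : String) (out : Int) : Decidable (Spec_find_bar_py s out) := by unfold Spec_find_bar_py; infer_instance

-- ===== CLAIM (what is proved, stated in full; the proofs are below) =====
def Claim_equal_find_bar_py : Prop := ∀ (s : String), Dom_find_bar_py s → Spec_find_bar_py s (find_bar_py s)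

-- ===== LEMMAS AND PROOFS =====

-- the fold's components are -1 or a nonnegative index
lemma fbFold_ge (cs : List Char) :
    -1 ≤ (cs.foldr fbStep (-1, -1)).1 ∧ -1 ≤ (cs.foldr fbStep (-1, -1)).2 := by
  induction cs with
  | nil => simp
  | cons c cs ih =>
    obtain ⟨h1, h2⟩ := ih
    simp only [List.foldr_cons, fbStep, fbShift]
    split_ifs <;> constructor <;> simp_all <;> omega

lemma fbShift_eq (i x : Int) (hx : -1 ≤ x) :
    (if fbShift x = -1 then (-1 : Int) else i + fbShift x)
      = (if x = -1 then -1 else (i + 1) + x) := by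
  unfold fbShift
  split_ifs <;> omega

lemma fbStep_nl (c : Char) (p : Int × Int) (h : c = '\n' ∨ c = '\r') :
    fbStep c p = (fbShift p.1, fbShift p.1) := by
  rcases h with h | h <;> simp [fbStep, h]

lemma fbStep_hash (c : Char) (p : Int × Int) (h1 : ¬(c = '\n' ∨ c = '\r')) (h2 : c = '#') :
    fbStep c p = (fbShift p.2, fbShift p.2) := by
  simp [fbStep, h1, h2]

lemma fbStep_bar (c : Char) (p : Int × Int) (h1 : ¬(c = '\n' ∨ c = '\r')) (h2 : ¬c = '#')
    (h3 : c = '|') : fbStep c p = (0, fbShift p.2) := by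
  simp [fbStep, h1, h2, h3]

lemma fbStep_other (c : Char) (p : Int × Int) (h1 : ¬(c = '\n' ∨ c = '\r')) (h2 : ¬c = '#')
    (h3 : ¬c = '|') : fbStep c p = (fbShift p.1, fbShift p.2) := by
  simp [fbStep, h1, h2, h3]

lemma aux_eq (cs : List Char) : ∀ (i : Int) (com : Bool),
    findBarAux cs i com =
      (let p := cs.foldr fbStep (-1, -1)
       let r := if com then p.2 else p.1
       if r = -1 then -1 else i + r) := by
  induction cs with
  | nil => intro i com; cases com <;> simp [findBarAux]
  | cons c cs ih =>
    intro i com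
    obtain ⟨h1, h2⟩ := fbFold_ge cs
    simp only [List.foldr_cons]
    rw [findBarAux]
    by_cases hnl : c = '\n' ∨ c = '\r'
    · rw [if_pos hnl, fbStep_nl c _ hnl, ih (i + 1) false]
      cases com <;> simp [fbShift_eq i _ h1]
    · by_cases hsh : c = '#'
      · rw [if_neg hnl, if_pos hsh, fbStep_hash c _ hnl hsh, ih (i + 1) true]
        cases com <;> simp [fbShift_eq i _ h2]
      · by_cases hbar : c = '|' ∧ com = false
        · rw [if_neg hnl, if_neg hsh, if_pos hbar, fbStep_bar c _ hnl hsh hbar.1]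
          simp [hbar.2]
        · rw [if_neg hnl, if_neg hsh, if_neg hbar]
          by_cases hc : c = '|'
          · have hcom : com = true := by
              cases com
              · exact absurd ⟨hc, rfl⟩ hbar
              · rfl
            rw [fbStep_bar c _ hnl hsh hc, ih (i + 1) com, hcom]
            simp [fbShift_eq i _ h2]
          · rw [fbStep_other c _ hnl hsh hc, ih (i + 1) com]
            cases com <;> simp [fbShift_eq i _ h1, fbShift_eq i _ h2]

-- ===== VERDICT (by name: the statement is the Claim_ definition above) =====
theorem find_bar_py_spec : Claim_equal_find_bar_py := by
  intro s _
  unfold Spec_find_bar_py find_bar_py find_bar_py_alt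
  rw [aux_eq]
  obtain ⟨h1, -⟩ := fbFold_ge s.toList
  show (if (s.toList.foldr fbStep (-1, -1)).1 = -1 then (-1 : Int)
        else 0 + (s.toList.foldr fbStep (-1, -1)).1)
      = (s.toList.foldr fbStep (-1, -1)).1
  split_ifs with h
  · exact h.symm
  · omega
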